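-- pv_equiv track=rewrite | github.com/chosaihim/jungle_git | codingTest/real_test/wooa1.py | solution
-- ===== SOURCE A (Python) =====
-- def solution(U, L, C):
--     C = [0] + C
--     answer = []
--     upper_row = []
--     lower_row = []
--
--     def dfs(U, L, upper, lower, col):
--         ret = False
--
--         upper_row.append(upper)
--         lower_row.append(lower)
--
--         if col == len(C):
--             if sum(upper_row) == U and sum(lower_row) == L:
--
--                 for one in upper_row[2:]:
--                     answer.append(str(one))
--                 answer.append(",")
--                 for one in lower_row[2:]:
--                     answer.append(str(one))
--                 return True
--
--         else:
--             if C[col] == 2: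
--                 ret = dfs(U, L, 1, 1, col+1)
--             elif C[col] == 0:
--                 ret = dfs(U, L, 0, 0, col+1)
--             else:
--                 ret = dfs(U, L, 1, 0, col+1)
--                 ret = dfs(U, L, 0, 1, col+1)
--
--         upper_row.pop()
--         lower_row.pop()
--
--         return ret
--
--
--     dfs(U, L, 0, 0, 0)
--     if not answer:
--         return "IMPOSSIBLE"
--     else:
--         answer_str = "".join(answer)
--         return answer_str
-- ===== SOURCE B (Python) =====
-- def solution(U, L, C):
--     k2 = C.count(2)
--     m = len(C) - C.count(0) - k2
--     a = U - k2
--     if a < 0 or a > m or k2 + (m - a) != L: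
--         return "IMPOSSIBLE"
--     upper = []
--     lower = []
--     used = 0
--     for v in C:
--         if v == 2:
--             upper.append("1")
--             lower.append("1")
--         elif v == 0:
--             upper.append("0")
--             lower.append("0")
--         elif used < a:
--             upper.append("1")
--             lower.append("0")
--             used += 1
--         else:
--             upper.append("0")
--             lower.append("1")
--     return "".join(upper + [","] + lower)
-- ===== Notes on version B (the rewrite author's own statement) =====
-- stated objective: faster
-- what changed: Replaces the exponential backtracking DFS over all upper/lower assignments (whose skipped pop on the success path makes it emit exactly the first solution found) by an O(n) counting construction: feasibility is decided arithmetically from the number of 2-columns and 1-ball columns, and the answer is built in one pass assigning the upper row to the first U - #twos one-ball columns.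
import Mathlib
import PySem

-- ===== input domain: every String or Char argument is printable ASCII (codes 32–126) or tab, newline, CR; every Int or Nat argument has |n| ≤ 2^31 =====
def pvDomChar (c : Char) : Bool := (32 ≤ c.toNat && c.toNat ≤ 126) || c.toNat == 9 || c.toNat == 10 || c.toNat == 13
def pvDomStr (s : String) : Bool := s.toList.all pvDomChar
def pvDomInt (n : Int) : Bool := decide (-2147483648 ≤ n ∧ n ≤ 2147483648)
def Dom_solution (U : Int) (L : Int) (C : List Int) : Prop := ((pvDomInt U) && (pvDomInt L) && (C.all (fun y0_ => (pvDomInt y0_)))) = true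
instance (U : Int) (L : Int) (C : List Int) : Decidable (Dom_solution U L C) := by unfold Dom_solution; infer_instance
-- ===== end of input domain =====

-- B replaces A's exponential backtracking DFS (which, due to a skipped pop on the
-- success path, emits exactly the first solution found) by an O(n) direct
-- construction: count the 2-columns, assign the upper row to the first U-#twos
-- one-ball columns. Equivalence of the RETURN values is proved (A only mutates
-- its own local lists).

-- ===== PORT A =====
-- state threaded through dfs: (ret, answer, upper_row, lower_row); fuel bounds the
-- recursion depth (col increases to len(C'), so fuel = len(C')+1 at the top call suffices).
def dfsA (U : Int) (L : Int) (Cp : List Int) : Nat → Int → Int → Nat → List String → List Int → List Int → Bool × List String × List Int × List Int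
  | 0, _, _, _, ans, ur, lr => (false, ans, ur, lr)   -- fuel exhausted: unreachable from `solution`
  | fuel + 1, upper, lower, col, ans, ur, lr =>
    let ur1 := ur ++ [upper]
    let lr1 := lr ++ [lower]
    if col = Cp.length then
      if ur1.sum = U ∧ lr1.sum = L then
        -- success: append the solution and return WITHOUT popping (as the Python does)
        (true, ans ++ ((ur1.drop 2).map PySem.Int.toStr) ++ [","] ++ ((lr1.drop 2).map PySem.Int.toStr), ur1, lr1)
      else
        (false, ans, ur1.dropLast, lr1.dropLast)
    else
      let c := Cp.getD col 0       -- C[col]; col < len(C') on every reachable call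
      if c = 2 then
        let r := dfsA U L Cp fuel 1 1 (col + 1) ans ur1 lr1
        (r.1, r.2.1, r.2.2.1.dropLast, r.2.2.2.dropLast)
      else if c = 0 then
        let r := dfsA U L Cp fuel 0 0 (col + 1) ans ur1 lr1
        (r.1, r.2.1, r.2.2.1.dropLast, r.2.2.2.dropLast)
      else
        let r1 := dfsA U L Cp fuel 1 0 (col + 1) ans ur1 lr1
        let r2 := dfsA U L Cp fuel 0 1 (col + 1) r1.2.1 r1.2.2.1 r1.2.2.2
        (r2.1, r2.2.1, r2.2.2.1.dropLast, r2.2.2.2.dropLast)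

def solution (U : Int) (L : Int) (C : List Int) : String :=
  let Cp := 0 :: C
  let r := dfsA U L Cp (Cp.length + 1) 0 0 0 [] [] []
  let answer := r.2.1
  if answer = [] then "IMPOSSIBLE" else PySem.Str.join "" answer

-- ===== PORT B =====
-- one fold over C with state (upper, lower, used), exactly Source B's loop
def altStep (a : Int) (st : List String × List String × Int) (v : Int) : List String × List String × Int :=
  if v = 2 then (st.1 ++ ["1"], st.2.1 ++ ["1"], st.2.2)
  else if v = 0 then (st.1 ++ ["0"], st.2.1 ++ ["0"], st.2.2)
  else if st.2.2 < a then (st.1 ++ ["1"], st.2.1 ++ ["0"], st.2.2 + 1)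
  else (st.1 ++ ["0"], st.2.1 ++ ["1"], st.2.2)

def solution_alt (U : Int) (L : Int) (C : List Int) : String :=
  let k2 : Int := PySem.List.count C 2
  let m : Int := (C.length : Int) - PySem.List.count C 0 - k2
  let a := U - k2
  if a < 0 ∨ a > m ∨ k2 + (m - a) ≠ L then "IMPOSSIBLE"
  else
    let st := C.foldl (altStep a) ([], [], 0)
    PySem.Str.join "" (st.1 ++ [","] ++ st.2.1)

-- ===== PRECONDITION & SPEC =====
def Spec_solution (U : Int) (L : Int) (C : List Int) (out : String) : Prop := out = solution_alt U L C
instance (U : Int) (L : Int) (C : List Int) (out : String) : Decidable (Spec_solution U L C out) := by unfold Spec_solution; infer_instance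

-- ===== CLAIM (what is proved, stated in full; the proofs are below) =====
def Claim_equal_solution : Prop := ∀ (U : Int) (L : Int) (C : List Int), Dom_solution U L C → Spec_solution U L C (solution U L C)

-- ===== LEMMAS AND PROOFS =====

-- number of 2-columns / of one-ball columns of a suffix, as Ints
def k2i (t : List Int) : Int := (t.count 2 : Int)
def mi (t : List Int) : Int := (t.countP (fun v => !(v == 0) && !(v == 2)) : Int)

-- feasibility: the suffix t can contribute exactly nu to the upper row and nl to the lower row
def feasB (t : List Int) (nu nl : Int) : Bool :=
  decide (k2i t ≤ nu ∧ nu - k2i t ≤ mi t ∧ nu + nl = 2 * k2i t + mi t)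

-- the first solution in A's DFS order: upper=1 preferred at each one-ball column
def greedy : List Int → Int → Int → List (Int × Int)
  | [], _, _ => []
  | v :: t, nu, nl =>
    if v = 2 then (1, 1) :: greedy t (nu - 1) (nl - 1)
    else if v = 0 then (0, 0) :: greedy t nu nl
    else if feasB t (nu - 1) nl then (1, 0) :: greedy t (nu - 1) nl
    else (0, 1) :: greedy t nu (nl - 1)

theorem k2i_cons (v : Int) (t : List Int) :
    k2i (v :: t) = (if v = 2 then 1 else 0) + k2i t := by
  simp [k2i, List.count_cons]
  by_cases h : v = 2 <;> simp [h] <;> omega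

theorem mi_cons (v : Int) (t : List Int) :
    mi (v :: t) = (if ¬(v = 0) ∧ ¬(v = 2) then 1 else 0) + mi t := by
  simp [mi, List.countP_cons]
  by_cases h0 : v = 0 <;> by_cases h2 : v = 2 <;> simp [h0, h2] <;> omega

theorem toStr_one : PySem.Int.toStr 1 = "1" := by decide

theorem toStr_zero : PySem.Int.toStr 0 = "0" := by decide

theorem feasB_nil (nu nl : Int) : feasB [] nu nl = true ↔ (nu = 0 ∧ nl = 0) := by
  simp [feasB, k2i, mi]
  omega

theorem mi_nonneg (t : List Int) : (0:Int) ≤ mi t := by unfold mi; exact Int.natCast_nonneg _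

theorem feasB_two (t : List Int) (nu nl : Int) :
    feasB (2 :: t) nu nl = feasB t (nu - 1) (nl - 1) := by
  simp only [feasB, k2i_cons, mi_cons, decide_eq_decide]
  norm_num
  constructor <;> intro <;> omega

theorem feasB_zero (t : List Int) (nu nl : Int) :
    feasB (0 :: t) nu nl = feasB t nu nl := by
  simp only [feasB, k2i_cons, mi_cons, decide_eq_decide]
  norm_num

theorem feasB_one (v : Int) (t : List Int) (nu nl : Int) (h0 : ¬ v = 0) (h2 : ¬ v = 2) :
    feasB (v :: t) nu nl = (feasB t (nu - 1) nl || feasB t nu (nl - 1)) := by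
  have hmn := mi_nonneg t
  rw [Bool.eq_iff_iff, Bool.or_eq_true]
  simp only [feasB, k2i_cons, mi_cons, h0, h2, decide_eq_true_eq]
  norm_num [h0, h2]
  constructor <;> intro h <;> omega

theorem feasB_pred (t : List Int) (x y : Int) :
    feasB t x y = true → feasB t x (y - 1) = false := by
  simp only [feasB, decide_eq_true_eq, decide_eq_false_iff_not]
  intro h
  omega

-- the main characterisation of A's dfs.
-- If the suffix is feasible for the pending sums, the call appends exactly the greedy
-- solution to `answer` and leaves one extra element (its own upper/lower values) on the
-- row lists; otherwise it restores the state it was called with.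
theorem dfsA_run (U L : Int) (Cp : List Int) :
    ∀ (fuel : Nat) (col : Nat) (u l : Int) (ans : List String) (ur lr : List Int),
    col ≤ Cp.length → Cp.length - col < fuel →
    (dfsA U L Cp fuel u l col ans ur lr).2 =
      (if feasB (Cp.drop col) (U - (ur ++ [u]).sum) (L - (lr ++ [l]).sum) then
        (ans ++ (((ur ++ [u]) ++ (greedy (Cp.drop col) (U - (ur ++ [u]).sum) (L - (lr ++ [l]).sum)).map Prod.fst).drop 2).map PySem.Int.toStr
             ++ [","] ++ (((lr ++ [l]) ++ (greedy (Cp.drop col) (U - (ur ++ [u]).sum) (L - (lr ++ [l]).sum)).map Prod.snd).drop 2).map PySem.Int.toStr,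
         ur ++ [u], lr ++ [l])
      else (ans, ur, lr)) := by
  intro fuel
  induction fuel with
  | zero =>
    intro col u l ans ur lr hcol hfuel
    exact absurd hfuel (by omega)
  | succ fuel ih =>
    intro col u l ans ur lr hcol hfuel
    by_cases hc : col = Cp.length
    · -- leaf frame
      have hdrop : Cp.drop col = [] := by rw [hc]; exact List.drop_length
      rw [hdrop]
      simp only [dfsA, if_pos hc]
      by_cases hsum : (ur ++ [u]).sum = U ∧ (lr ++ [l]).sum = L
      · have hfe : feasB [] (U - (ur ++ [u]).sum) (L - (lr ++ [l]).sum) = true := by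
          rw [feasB_nil]; omega
        rw [if_pos hsum, if_pos hfe]
        simp [greedy]
      · have hfe : feasB [] (U - (ur ++ [u]).sum) (L - (lr ++ [l]).sum) = false := by
          rw [Bool.eq_false_iff]
          intro h
          exact hsum (by have := (feasB_nil _ _).1 h; omega)
        rw [if_neg hsum, hfe]
        simp
    · -- internal frame
      have hlt : col < Cp.length := by omega
      have hrest : Cp.drop col = Cp[col] :: Cp.drop (col + 1) := List.drop_eq_getElem_cons hlt
      have hgd : Cp.getD col 0 = Cp[col] := List.getD_eq_getElem Cp 0 hlt
      rw [hrest]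
      simp only [dfsA, if_neg hc, hgd]
      have h1 := ih (col + 1) 1 0 ans (ur ++ [u]) (lr ++ [l]) (by omega) (by omega)
      have h1' := ih (col + 1) 1 1 ans (ur ++ [u]) (lr ++ [l]) (by omega) (by omega)
      have h0' := ih (col + 1) 0 0 ans (ur ++ [u]) (lr ++ [l]) (by omega) (by omega)
      by_cases hc2 : Cp[col] = (2 : Int)
      · rw [if_pos hc2, hc2]
        rw [h1']
        rw [feasB_two]
        have harith : U - (ur ++ [u] ++ [1]).sum = U - (ur ++ [u]).sum - 1 ∧
            L - (lr ++ [l] ++ [1]).sum = L - (lr ++ [l]).sum - 1 := by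
          simp; omega
        rw [harith.1, harith.2]
        by_cases hfe : feasB (Cp.drop (col + 1)) (U - (ur ++ [u]).sum - 1) (L - (lr ++ [l]).sum - 1) = true
        · rw [if_pos hfe, if_pos hfe]
          simp [greedy]
        · rw [if_neg hfe, if_neg hfe]
          simp
      · by_cases hc0 : Cp[col] = (0 : Int)
        · rw [if_neg hc2, if_pos hc0, hc0]
          rw [h0']
          rw [feasB_zero]
          have harith : U - (ur ++ [u] ++ [0]).sum = U - (ur ++ [u]).sum ∧
              L - (lr ++ [l] ++ [0]).sum = L - (lr ++ [l]).sum := by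
            simp
          rw [harith.1, harith.2]
          by_cases hfe : feasB (Cp.drop (col + 1)) (U - (ur ++ [u]).sum) (L - (lr ++ [l]).sum) = true
          · rw [if_pos hfe, if_pos hfe]
            simp [greedy]
          · rw [if_neg hfe, if_neg hfe]
            simp
        · -- one-ball column: try upper first, then lower; a success leaves the (1,0)
          -- imbalance that makes the second branch infeasible
          rw [if_neg hc2, if_neg hc0]
          rw [h1]
          have hone := feasB_one (Cp[col]) (Cp.drop (col + 1))
            (U - (ur ++ [u]).sum) (L - (lr ++ [l]).sum) hc0 hc2
          have ha1 : U - (ur ++ [u] ++ [1]).sum = U - (ur ++ [u]).sum - 1 := by simp; omega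
          have ha0 : L - (lr ++ [l] ++ [0]).sum = L - (lr ++ [l]).sum := by simp
          rw [ha1, ha0]
          by_cases hfe1 : feasB (Cp.drop (col + 1)) (U - (ur ++ [u]).sum - 1) (L - (lr ++ [l]).sum) = true
          · -- first branch succeeds; second branch runs on the corrupted lists and fails
            rw [if_pos hfe1]
            have h2nd := ih (col + 1) 0 1
              (ans ++ ((ur ++ [u] ++ [1] ++ (greedy (Cp.drop (col + 1)) (U - (ur ++ [u]).sum - 1) (L - (lr ++ [l]).sum)).map Prod.fst).drop 2).map PySem.Int.toStr
                   ++ [","] ++ ((lr ++ [l] ++ [0] ++ (greedy (Cp.drop (col + 1)) (U - (ur ++ [u]).sum - 1) (L - (lr ++ [l]).sum)).map Prod.snd).drop 2).map PySem.Int.toStr)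
              (ur ++ [u] ++ [1]) (lr ++ [l] ++ [0]) (by omega) (by omega)
            have hblock : feasB (Cp.drop (col + 1)) (U - (ur ++ [u] ++ [1] ++ [0]).sum) (L - (lr ++ [l] ++ [0] ++ [1]).sum) = false := by
              have hb : U - (ur ++ [u] ++ [1] ++ [0]).sum = U - (ur ++ [u]).sum - 1 := by simp; omega
              have hb' : L - (lr ++ [l] ++ [0] ++ [1]).sum = L - (lr ++ [l]).sum - 1 := by simp; omega
              rw [hb, hb']
              exact feasB_pred _ _ _ hfe1
            rw [hblock] at h2nd
            simp only [if_false, Bool.false_eq_true] at h2nd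
            rw [h2nd]
            have hpar : feasB (Cp[col] :: Cp.drop (col + 1)) (U - (ur ++ [u]).sum) (L - (lr ++ [l]).sum) = true := by
              rw [hone, hfe1, Bool.true_or]
            rw [if_pos hpar]
            have hfe1s : feasB (Cp.drop (col + 1)) (U - (ur.sum + u) - 1) (L - (lr.sum + l)) = true := by
              simpa using hfe1
            simp [greedy, hc2, hc0, hfe1s]
          · -- first branch fails and restores the state
            rw [if_neg hfe1]
            have hfe1f : feasB (Cp.drop (col + 1)) (U - (ur ++ [u]).sum - 1) (L - (lr ++ [l]).sum) = false :=
              Bool.eq_false_iff.2 hfe1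
            have h2nd := ih (col + 1) 0 1 ans (ur ++ [u]) (lr ++ [l]) (by omega) (by omega)
            have hb : U - (ur ++ [u] ++ [0]).sum = U - (ur ++ [u]).sum := by simp
            have hb' : L - (lr ++ [l] ++ [1]).sum = L - (lr ++ [l]).sum - 1 := by simp; omega
            rw [hb, hb'] at h2nd
            rw [h2nd]
            rw [hone, hfe1f, Bool.false_or]
            by_cases hfe2 : feasB (Cp.drop (col + 1)) (U - (ur ++ [u]).sum) (L - (lr ++ [l]).sum - 1) = true
            · rw [if_pos hfe2, if_pos hfe2]
              have hfe1s : feasB (Cp.drop (col + 1)) (U - (ur.sum + u) - 1) (L - (lr.sum + l)) = false := by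
                simpa using hfe1f
              simp [greedy, hc2, hc0, hfe1s]
            · rw [if_neg hfe2, if_neg hfe2]
              simp

-- B's fold equals the greedy solution rendered as strings, under feasibility and the
-- quota invariant  nu - k2i t = a - used.
theorem fold_greedy (a : Int) :
    ∀ (t : List Int) (nu nl used : Int) (up lo : List String),
    feasB t nu nl = true → nu - k2i t = a - used →
    t.foldl (altStep a) (up, lo, used) =
      (up ++ (greedy t nu nl).map (fun p => PySem.Int.toStr p.1),
       lo ++ (greedy t nu nl).map (fun p => PySem.Int.toStr p.2),
       used + (nu - k2i t)) := by
  intro t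
  induction t with
  | nil =>
    intro nu nl used up lo hf hq
    have h0 := (feasB_nil nu nl).1 hf
    simp [greedy, k2i]
    omega
  | cons v t ih =>
    intro nu nl used up lo hf hq
    by_cases h2 : v = 2
    · subst h2
      have hf' : feasB t (nu - 1) (nl - 1) = true := by
        simp [feasB, k2i_cons, mi_cons] at hf ⊢; omega
      have hstep : altStep a (up, lo, used) 2 = (up ++ ["1"], lo ++ ["1"], used) := by
        simp [altStep]
      rw [List.foldl_cons, hstep]
      rw [ih (nu - 1) (nl - 1) used (up ++ ["1"]) (lo ++ ["1"]) hf'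
          (by simp [k2i_cons] at hq ⊢; omega)]
      simp [greedy, k2i_cons, toStr_one]
      omega
    · by_cases h0 : v = 0
      · subst h0
        have hf' : feasB t nu nl = true := by
          simp [feasB, k2i_cons, mi_cons] at hf ⊢; omega
        have hstep : altStep a (up, lo, used) 0 = (up ++ ["0"], lo ++ ["0"], used) := by
          simp [altStep]
        rw [List.foldl_cons, hstep]
        rw [ih nu nl used (up ++ ["0"]) (lo ++ ["0"]) hf'
            (by simp [k2i_cons] at hq ⊢; omega)]
        simp [greedy, k2i_cons, toStr_zero]
      · -- one-ball column: the fold's quota test (used < a) ↔ greedy's feasibility test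
        have hk : k2i (v :: t) = k2i t := by simp [k2i_cons, h2]
        have hm : mi (v :: t) = 1 + mi t := by simp [mi_cons, h0, h2]
        rw [hk] at hq
        have hff := hf
        rw [feasB, hk, hm] at hff
        simp only [decide_eq_true_eq] at hff
        have hiff : (feasB t (nu - 1) nl = true) ↔ used < a := by
          rw [feasB]
          simp only [decide_eq_true_eq]
          omega
        rw [List.foldl_cons]
        by_cases hu : used < a
        · have hg : feasB t (nu - 1) nl = true := hiff.2 hu
          have hstep : altStep a (up, lo, used) v = (up ++ ["1"], lo ++ ["0"], used + 1) := by
            simp [altStep, if_neg h2, if_neg h0, if_pos hu]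
          rw [hstep]
          rw [ih (nu - 1) nl (used + 1) (up ++ ["1"]) (lo ++ ["0"]) hg
              (by rw [feasB] at hg; simp only [decide_eq_true_eq] at hg; omega)]
          simp [greedy, h0, h2, hg, hk, toStr_one, toStr_zero]
          omega
        · have hg : ¬ (feasB t (nu - 1) nl = true) := fun h => hu (hiff.1 h)
          have hmn : (0:Int) ≤ mi t := by unfold mi; exact Int.natCast_nonneg _
          have hf' : feasB t nu (nl - 1) = true := by
            rw [feasB]
            simp only [decide_eq_true_eq]
            omega
          have hstep : altStep a (up, lo, used) v = (up ++ ["0"], lo ++ ["1"], used) := by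
            simp [altStep, if_neg h2, if_neg h0, if_neg hu]
          rw [hstep]
          rw [ih nu (nl - 1) used (up ++ ["0"]) (lo ++ ["1"]) hf'
              (by omega)]
          simp [greedy, h0, h2, hg, hk, toStr_one, toStr_zero]

theorem count_len_split_nat (C : List Int) :
    C.length = C.count 0 + C.count 2 + C.countP (fun v => !(v == 0) && !(v == 2)) := by
  induction C with
  | nil => rfl
  | cons v t ih =>
    simp only [List.length_cons, List.count_cons, List.countP_cons, ih]
    by_cases h0 : v = 0 <;> by_cases h2 : v = 2 <;> simp [h0, h2] <;> omega

theorem count_len_split (C : List Int) :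
    (C.length : Int) = (C.count 0 : Int) + (C.count 2 : Int) + mi C := by
  unfold mi
  exact_mod_cast count_len_split_nat C

-- ===== VERDICT (by name: the statement is the Claim_ definition above) =====
theorem solution_spec : Claim_equal_solution := by
  intro U L C _
  show solution U L C = solution_alt U L C
  have h := dfsA_run U L (0 :: C) ((0 :: C).length + 1) 0 0 0 [] [] [] (Nat.zero_le _) (by omega)
  simp only [List.drop_zero, List.nil_append, List.sum_cons, List.sum_nil, add_zero, sub_zero] at h
  rw [feasB_zero] at h
  have hsplit := count_len_split C
  have hkk : k2i C = (C.count 2 : Int) := rfl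
  have hmn := mi_nonneg C
  by_cases hfe : feasB C U L = true
  · rw [if_pos hfe] at h
    have hfeP : k2i C ≤ U ∧ U - k2i C ≤ mi C ∧ U + L = 2 * k2i C + mi C := by
      simpa [feasB] using hfe
    simp only [solution, solution_alt, PySem.List.count_eq]
    rw [h]
    have hg0 : greedy (0 :: C) U L = (0, 0) :: greedy C U L := by
      simp [greedy]
    rw [hg0]
    have hcond : ¬ (U - (List.count 2 C : Int) < 0 ∨
        U - (List.count 2 C : Int) > (C.length : Int) - (List.count 0 C : Int) - (List.count 2 C : Int) ∨
        (List.count 2 C : Int) + ((C.length : Int) - (List.count 0 C : Int) - (List.count 2 C : Int) - (U - (List.count 2 C : Int))) ≠ L) := by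
      omega
    rw [if_neg hcond]
    rw [fold_greedy (U - (List.count 2 C : Int)) C U L 0 [] [] hfe (by omega)]
    simp [List.map_map, Function.comp_def]
  · have hfeF : feasB C U L = false := Bool.eq_false_iff.2 hfe
    rw [hfeF] at h
    simp only [Bool.false_eq_true, if_false] at h
    simp only [solution, solution_alt, PySem.List.count_eq]
    rw [h]
    have hnf : ¬ (k2i C ≤ U ∧ U - k2i C ≤ mi C ∧ U + L = 2 * k2i C + mi C) := by
      intro hco
      have ht : feasB C U L = true := by rw [feasB]; exact decide_eq_true hco
      rw [ht] at hfeF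
      cases hfeF
    have hcondT : (U - (List.count 2 C : Int) < 0 ∨
        U - (List.count 2 C : Int) > (C.length : Int) - (List.count 0 C : Int) - (List.count 2 C : Int) ∨
        (List.count 2 C : Int) + ((C.length : Int) - (List.count 0 C : Int) - (List.count 2 C : Int) - (U - (List.count 2 C : Int))) ≠ L) := by
      omega
    rw [if_pos hcondT]
    simp
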